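-- pv_equiv track=rewrite | github.com/moqimoqidea/Wegent | knowledge_engine/knowledge_engine/index/indexer.py | sanitize_metadata
-- ===== SOURCE A (Python) =====
-- from typing import Any, Dict, List
--
-- SAFE_METADATA_KEYS = {
--     "filename",
--     "file_path",
--     "file_name",
--     "file_type",
--     "file_size",
--     "creation_date",
--     "last_modified_date",
--     "page_label",
--     "page_number",
-- }
--
-- def sanitize_metadata(metadata: Dict[str, Any]) -> Dict[str, Any]:
--     sanitized = {}
--     for key in SAFE_METADATA_KEYS:
--         if key in metadata:
--             value = metadata[key]
--             if value is not None:
--                 sanitized[key] = str(value) if not isinstance(value, str) else value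
--     return sanitized
-- ===== SOURCE B (Python) =====
-- from typing import Any, Dict
--
-- SAFE_METADATA_KEYS = {
--     "filename",
--     "file_path",
--     "file_name",
--     "file_type",
--     "file_size",
--     "creation_date",
--     "last_modified_date",
--     "page_label",
--     "page_number",
-- }
--
-- def sanitize_metadata(metadata: Dict[str, Any]) -> Dict[str, Any]:
--     # One pass over metadata, filtering by safe-set membership; keys emitted sorted.
--     kept = {key: value if isinstance(value, str) else str(value)
--             for key, value in metadata.items()
--             if key in SAFE_METADATA_KEYS and value is not None}
--     return {key: kept[key] for key in sorted(kept)}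
-- ===== Notes on version B (the rewrite author's own statement) =====
-- stated objective: alternative
-- what changed: B makes a single pass over metadata.items() filtering by membership in the safe-key set (emitting the kept keys in sorted order), instead of iterating the fixed safe-key set and looking each key up in metadata; Pre_ excludes association lists with duplicate keys, which represent no Python dict and whose first-vs-last-match behaviour is accidental.
import Mathlib
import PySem

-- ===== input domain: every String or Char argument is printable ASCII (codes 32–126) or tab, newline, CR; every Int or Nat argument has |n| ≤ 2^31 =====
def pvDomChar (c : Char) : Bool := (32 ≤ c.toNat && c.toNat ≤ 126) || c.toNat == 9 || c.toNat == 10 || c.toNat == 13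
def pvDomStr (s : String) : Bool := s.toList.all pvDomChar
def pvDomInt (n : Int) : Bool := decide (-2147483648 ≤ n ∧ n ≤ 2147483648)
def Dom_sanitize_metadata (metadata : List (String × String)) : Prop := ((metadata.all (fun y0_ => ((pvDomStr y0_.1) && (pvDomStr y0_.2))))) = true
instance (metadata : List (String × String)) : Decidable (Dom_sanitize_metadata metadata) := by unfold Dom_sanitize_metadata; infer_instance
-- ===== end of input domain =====

-- B filters metadata in a single pass by safe-set membership (keys emitted sorted)
-- instead of iterating the fixed safe-key set and looking each key up in metadata;
-- the proven equality is about the returned dict (as an association list).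

-- ===== PORT A =====
-- SAFE_METADATA_KEYS is a Python set; iteration order of a set is arbitrary, and
-- dicts compare ignoring order, so the set literal is transcribed in sorted order.
def pvSafeKeys : List String :=
  ["creation_date", "file_name", "file_path", "file_size", "file_type",
   "filename", "last_modified_date", "page_label", "page_number"]

-- 'key in metadata' + 'metadata[key]' together are the get? match; values are
-- strings here, so 'value is not None' holds and 'str(value) if …' is 'value'.
def sanitize_metadata (metadata : List (String × String)) : List (String × String) :=
  (pvSafeKeys.foldl
    (fun (sanitized : PySem.Dict String String) key =>
      match (PySem.Dict.mk metadata).get? key with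
      | some value => sanitized.insert key value
      | none => sanitized)
    PySem.Dict.empty).items

-- ===== PORT B =====
-- 'kept' dict comprehension: one pass over metadata.items(), keep safe keys
-- (values are strings, so the isinstance branch keeps the value as is).
-- Then '{k: kept[k] for k in sorted(kept)}'; kept[k] is ported as getD with a
-- default that is never used, since every k of sorted(kept) is a key of kept.
def sanitize_metadata_alt (metadata : List (String × String)) : List (String × String) :=
  let kept : PySem.Dict String String :=
    metadata.foldl
      (fun d kv => if pvSafeKeys.contains kv.1 then d.insert kv.1 kv.2 else d)
      PySem.Dict.empty
  (PySem.List.sorted kept.keys (fun k => k) false).map (fun k => (k, kept.getD k ""))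

-- ===== PRECONDITION & SPEC =====
-- Pre_ excludes association lists with duplicate keys: they represent no Python
-- dict (the input type is Dict[str, Any]), and the ports' first-vs-last-match
-- behaviour on them is accidental.
def Pre_sanitize_metadata (metadata : List (String × String)) : Prop :=
  (metadata.map Prod.fst).Nodup
instance (metadata : List (String × String)) : Decidable (Pre_sanitize_metadata metadata) := by unfold Pre_sanitize_metadata; infer_instance

def pvWitness_sanitize_metadata : (List (String × String)) :=
  [("filename", "a.txt"), ("color", "red"), ("page_number", "3")]

def Spec_sanitize_metadata (metadata : List (String × String)) (out : List (String × String)) : Prop := out = sanitize_metadata_alt metadata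
instance (metadata : List (String × String)) (out : List (String × String)) : Decidable (Spec_sanitize_metadata metadata out) := by unfold Spec_sanitize_metadata; infer_instance

-- ===== CLAIM (what is proved, stated in full; the proofs are below) =====
def Claim_equal_sanitize_metadata : Prop := ∀ (metadata : List (String × String)), Dom_sanitize_metadata metadata → Pre_sanitize_metadata metadata → Spec_sanitize_metadata metadata (sanitize_metadata metadata)

-- ===== LEMMAS AND PROOFS =====

-- A's loop over distinct keys, each inserted at most once into a dict it is not
-- yet in, appends its hits in key-list order.
theorem pv_foldA
    (d : PySem.Dict String String) :
    ∀ (ks : List String) (acc : PySem.Dict String String),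
    (∀ k ∈ ks, acc.contains k = false) → ks.Nodup →
    (ks.foldl
      (fun (s : PySem.Dict String String) k =>
        match d.get? k with
        | some value => s.insert k value
        | none => s) acc).items
      = acc.items ++ ks.filterMap (fun k => (d.get? k).map (fun v => (k, v))) := by
  intro ks
  induction ks with
  | nil => intro acc _ _; simp
  | cons k ks ih =>
    intro acc hfresh hnd
    simp only [List.foldl_cons, List.filterMap_cons]
    cases hg : d.get? k with
    | none =>
      simpa using ih acc (fun k' hk' => hfresh k' (by simp [hk'])) hnd.of_cons
    | some v =>
      have hk : acc.contains k = false := hfresh k (by simp)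
      have hfresh' : ∀ k' ∈ ks, (acc.insert k v).contains k' = false := by
        intro k' hk'
        have hne : k' ≠ k := fun h => (List.nodup_cons.mp hnd).1 (h ▸ hk')
        simp [PySem.Dict.contains_insert, hne, hfresh k' (by simp [hk'])]
      rw [ih (acc.insert k v) hfresh' hnd.of_cons,
          PySem.Dict.items_insert_of_not_contains _ _ hk]
      simp

-- B's loop over metadata with distinct keys appends exactly the safe pairs.
theorem pv_foldB :
    ∀ (l : List (String × String)) (acc : PySem.Dict String String),
    (∀ kv ∈ l, acc.contains kv.1 = false) → (l.map Prod.fst).Nodup →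
    (l.foldl
      (fun (d : PySem.Dict String String) kv =>
        if pvSafeKeys.contains kv.1 then d.insert kv.1 kv.2 else d) acc).items
      = acc.items ++ l.filter (fun kv => pvSafeKeys.contains kv.1) := by
  intro l
  induction l with
  | nil => intro acc _ _; simp
  | cons kv l ih =>
    intro acc hfresh hnd
    simp only [List.map_cons, List.nodup_cons] at hnd
    simp only [List.foldl_cons, List.filter_cons]
    by_cases hs : pvSafeKeys.contains kv.1 = true
    · have hk : acc.contains kv.1 = false := hfresh kv (by simp)
      have hfresh' : ∀ kv' ∈ l, (acc.insert kv.1 kv.2).contains kv'.1 = false := by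
        intro kv' hkv'
        have hne : kv'.1 ≠ kv.1 := fun h => hnd.1 (h ▸ List.mem_map_of_mem hkv')
        simp [PySem.Dict.contains_insert, hne, hfresh kv' (by simp [hkv'])]
      rw [if_pos hs, ih (acc.insert kv.1 kv.2) hfresh' hnd.2,
          PySem.Dict.items_insert_of_not_contains _ _ hk]
      have hm : kv.1 ∈ pvSafeKeys := by simpa using hs
      simp [hm]
    · rw [if_neg hs]
      rw [ih acc (fun kv' hkv' => hfresh kv' (by simp [hkv'])) hnd.2]
      have hm : kv.1 ∉ pvSafeKeys := by simpa using hs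
      simp [hm]

-- filterMap over a key list through get? = map getD over the contained keys.
theorem pv_filterMap_eq_map_filter (d : PySem.Dict String String) :
    ∀ (ks : List String),
    ks.filterMap (fun k => (d.get? k).map (fun v => (k, v)))
      = (ks.filter (fun k => d.contains k)).map (fun k => (k, d.getD k "")) := by
  intro ks
  induction ks with
  | nil => simp
  | cons k ks ih =>
    simp only [List.filterMap_cons, List.filter_cons]
    cases hg : d.get? k with
    | none =>
      have hc : d.contains k = false := by
        rw [PySem.Dict.contains_eq_isSome_get?, hg]; rfl
      simp [hc, ih]
    | some v =>
      have hc : d.contains k = true := by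
        rw [PySem.Dict.contains_eq_isSome_get?, hg]; rfl
      simp [hc, ih, PySem.Dict.getD_of_get?_eq_some _ _ hg]

theorem pvSafeKeys_sorted : pvSafeKeys.Pairwise (· < ·) := by
  have h : pvSafeKeys.Pairwise (fun a b => a.toList < b.toList) := by decide
  exact h.imp (fun hab => String.lt_iff_toList_lt.mpr hab)

theorem pvSafeKeys_nodup : pvSafeKeys.Nodup := pvSafeKeys_sorted.nodup

theorem pv_main (metadata : List (String × String))
    (hnd : (metadata.map Prod.fst).Nodup) :
    sanitize_metadata metadata = sanitize_metadata_alt metadata := by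
  set d : PySem.Dict String String := PySem.Dict.mk metadata with hd
  have hdkeys : d.keys = metadata.map Prod.fst := by simp [hd, PySem.Dict.keys]
  have hdnodup : d.keys.Nodup := hdkeys ▸ hnd
  -- A's side
  have hA : sanitize_metadata metadata
      = pvSafeKeys.filterMap (fun k => (d.get? k).map (fun v => (k, v))) := by
    unfold sanitize_metadata
    rw [pv_foldA d pvSafeKeys PySem.Dict.empty
        (fun k _ => PySem.Dict.contains_empty k) pvSafeKeys_nodup]
    simp [PySem.Dict.empty]
  -- B's kept dict
  set kept : PySem.Dict String String :=
    metadata.foldl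
      (fun d kv => if pvSafeKeys.contains kv.1 then d.insert kv.1 kv.2 else d)
      PySem.Dict.empty with hkept
  have hkitems : kept.items = metadata.filter (fun kv => pvSafeKeys.contains kv.1) := by
    rw [hkept, pv_foldB metadata PySem.Dict.empty
        (fun kv _ => PySem.Dict.contains_empty kv.1) hnd]
    simp [PySem.Dict.empty]
  have hkkeys : kept.keys = (metadata.map Prod.fst).filter (fun k => pvSafeKeys.contains k) := by
    show kept.items.map Prod.fst = _
    rw [hkitems]
    simp [List.filter_map, Function.comp_def]
  have hkknodup : kept.keys.Nodup := hkkeys ▸ hnd.filter _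
  -- the target key order
  set target : List String := pvSafeKeys.filter (fun k => d.contains k) with htarget
  have htnodup : target.Nodup := pvSafeKeys_nodup.filter _
  have hperm : target.Perm kept.keys := by
    rw [List.perm_ext_iff_of_nodup htnodup hkknodup]
    intro k
    rw [htarget, hkkeys]
    simp only [List.mem_filter]
    constructor
    · rintro ⟨hks, hdc⟩
      refine ⟨?_, by simpa using hks⟩
      rw [← hdkeys]
      exact (PySem.Dict.contains_iff_mem_keys d k).mp hdc
    · rintro ⟨hmk, hks⟩
      refine ⟨by simpa using hks, ?_⟩
      exact (PySem.Dict.contains_iff_mem_keys d k).mpr (hdkeys ▸ hmk)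
  have hsorted : PySem.List.sorted kept.keys (fun k => k) false = target :=
    PySem.List.sorted_eq_of_perm_of_pairwise_lt kept.keys target (fun k => k) hperm
      (pvSafeKeys_sorted.filter _)
  -- B's side reduces to a map over target
  have hB : sanitize_metadata_alt metadata
      = target.map (fun k => (k, kept.getD k "")) := by
    show (PySem.List.sorted kept.keys (fun k => k) false).map
        (fun k => (k, kept.getD k "")) = _
    rw [hsorted]
  -- pointwise, kept agrees with d on target
  rw [hA, hB, pv_filterMap_eq_map_filter d pvSafeKeys, ← htarget]
  apply List.map_congr_left
  intro k hk
  rw [htarget, List.mem_filter] at hk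
  obtain ⟨hks, hdc⟩ := hk
  have hvs : (d.get? k).isSome = true := by
    rw [← PySem.Dict.contains_eq_isSome_get?]; exact hdc
  obtain ⟨v, hv⟩ := Option.isSome_iff_exists.mp hvs
  have hmem : (k, v) ∈ metadata := by
    have := PySem.Dict.mem_items_of_get?_eq_some d hv
    simpa [hd, PySem.Dict.items] using this
  have hkeptmem : (k, v) ∈ kept.items := by
    rw [hkitems, List.mem_filter]
    exact ⟨hmem, by simpa using hks⟩
  rw [PySem.Dict.getD_of_get?_eq_some _ _ hv,
      PySem.Dict.getD_of_mem_items kept hkeptmem hkknodup]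

-- ===== VERDICT (by name: the statement is the Claim_ definition above) =====
theorem sanitize_metadata_spec : Claim_equal_sanitize_metadata := by
  intro metadata _ hpre
  unfold Spec_sanitize_metadata
  exact pv_main metadata hpre
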